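-- pv_equiv track=rewrite | github.com/lacmih/Genetic_Music_Generating | fitness_functions.py | beat_fitness
-- ===== SOURCE A (Python) =====
-- def beat_fitness(melody_beats):
--     ind = 0
--     sum_beats = 0
--     dist = 0
--     average_beat = 4
--     for i in melody_beats:
--         if ind < 4:
--             sum_beats += i
--         else:
--             dist += abs(sum_beats - average_beat)
--             sum_beats = 0
--             ind = -1
--         ind += 1
--     return dist
-- ===== SOURCE B (Python) =====
-- def beat_fitness(melody_beats):
--     dist = 0
--     n = len(melody_beats)
--     j = 4
--     while j < n:
--         dist += abs(sum(melody_beats[j-4:j]) - 4)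
--         j += 5
--     return dist
-- ===== Notes on version B (the rewrite author's own statement) =====
-- stated objective: simpler
-- what changed: Replaced A's single stateful pass with a mutable position counter, running sum and reset branch by a while-loop that consumes the list five elements at a time: dist += abs(sum(chunk[:4]) - 4); chunk = chunk[5:].
import Mathlib
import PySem

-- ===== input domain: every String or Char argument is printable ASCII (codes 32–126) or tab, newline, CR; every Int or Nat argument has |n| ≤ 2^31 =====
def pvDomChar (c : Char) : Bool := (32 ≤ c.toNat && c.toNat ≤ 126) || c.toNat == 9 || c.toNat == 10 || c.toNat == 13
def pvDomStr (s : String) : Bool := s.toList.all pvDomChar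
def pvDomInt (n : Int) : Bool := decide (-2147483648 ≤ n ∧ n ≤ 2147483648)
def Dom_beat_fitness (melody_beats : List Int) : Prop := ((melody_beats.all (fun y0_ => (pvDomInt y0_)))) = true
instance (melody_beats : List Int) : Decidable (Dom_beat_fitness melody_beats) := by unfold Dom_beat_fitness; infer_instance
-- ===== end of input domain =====

-- B replaces A's stateful per-element pass (position counter, running sum, reset branch)
-- by a loop over group boundaries j = 4, 9, 14, … that sums the 4-element slice before each
-- boundary directly (objective: simpler decomposition, same cost).

-- ===== PORT A =====
-- loop body of A: state is (ind, sum_beats, dist)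
def beat_fitness_step (st : Int × Int × Int) (i : Int) : Int × Int × Int :=
  if st.1 < 4 then (st.1 + 1, st.2.1 + i, st.2.2)
  else (-1 + 1, 0, st.2.2 + |st.2.1 - 4|)

def beat_fitness (melody_beats : List Int) : Int :=
  (melody_beats.foldl beat_fitness_step (0, 0, 0)).2.2

-- ===== PORT B =====
-- B's while-loop: while j < n: dist += abs(sum(melody_beats[j-4:j]) - 4); j += 5
-- (j starts at 4 and only grows, so it is kept as a Nat; j - 4 in the slice is the Int value)
def beat_fitness_alt_loop (l : List Int) (j : Nat) (dist : Int) : Int :=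
  if j < l.length then
    beat_fitness_alt_loop l (j + 5)
      (dist + |(PySem.List.slice l (some ((j : Int) - 4)) (some (j : Int))).sum - 4|)
  else dist
termination_by l.length - j

def beat_fitness_alt (melody_beats : List Int) : Int :=
  beat_fitness_alt_loop melody_beats 4 0

-- ===== PRECONDITION & SPEC =====
def Spec_beat_fitness (melody_beats : List Int) (out : Int) : Prop := out = beat_fitness_alt melody_beats
instance (melody_beats : List Int) (out : Int) : Decidable (Spec_beat_fitness melody_beats out) := by unfold Spec_beat_fitness; infer_instance

-- ===== CLAIM (what is proved, stated in full; the proofs are below) =====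
def Claim_equal_beat_fitness : Prop := ∀ (melody_beats : List Int), Dom_beat_fitness melody_beats → Spec_beat_fitness melody_beats (beat_fitness melody_beats)

-- ===== LEMMAS AND PROOFS =====

-- proof-only reference function: fold over complete 5-blocks
def chunkF : List Int → Int → Int
  | a :: b :: c :: d :: _ :: rest, dist => chunkF rest (dist + |a + b + c + d - 4|)
  | _, dist => dist

lemma chunkF_short (l : List Int) (dist : Int) (h : l.length < 5) : chunkF l dist = dist := by
  match l with
  | [] => rfl
  | [_] => rfl
  | [_, _] => rfl
  | [_, _, _] => rfl
  | [_, _, _, _] => rfl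
  | _ :: _ :: _ :: _ :: _ :: _ => simp at h; omega

-- A's fold equals the block fold
lemma beat_fitness_eq_chunkF : ∀ (n : ℕ) (l : List Int), l.length ≤ n → ∀ (dist : Int),
    (l.foldl beat_fitness_step (0, 0, dist)).2.2 = chunkF l dist := by
  intro n
  induction n with
  | zero =>
    intro l hl dist
    have : l = [] := List.eq_nil_of_length_eq_zero (Nat.le_zero.mp hl)
    subst this; rfl
  | succ n ih =>
    intro l hl dist
    match l with
    | [] => rfl
    | [a] => simp [List.foldl, beat_fitness_step, chunkF]
    | [a, b] => simp [List.foldl, beat_fitness_step, chunkF]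
    | [a, b, c] => simp [List.foldl, beat_fitness_step, chunkF]
    | [a, b, c, d] => simp [List.foldl, beat_fitness_step, chunkF]
    | a :: b :: c :: d :: e :: rest =>
      have hstep : ((a :: b :: c :: d :: e :: rest).foldl beat_fitness_step (0, 0, dist))
          = rest.foldl beat_fitness_step (0, 0, dist + |a + b + c + d - 4|) := by
        simp [List.foldl, beat_fitness_step]
      rw [hstep, ih rest (by simp at hl; omega)]
      rfl

-- B's boundary loop at boundary j equals the block fold on the suffix from j - 4
lemma alt_loop_eq_chunkF : ∀ (k : ℕ) (l : List Int) (j : Nat), l.length - j ≤ k → 4 ≤ j →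
    ∀ (dist : Int), beat_fitness_alt_loop l j dist = chunkF (l.drop (j - 4)) dist := by
  intro k
  induction k with
  | zero =>
    intro l j hk hj dist
    rw [beat_fitness_alt_loop]
    have hnot : ¬ j < l.length := by omega
    rw [if_neg hnot, chunkF_short _ _ (by simp; omega)]
  | succ k ih =>
    intro l j hk hj dist
    rw [beat_fitness_alt_loop]
    by_cases hlt : j < l.length
    · rw [if_pos hlt]
      have hslice : PySem.List.slice l (some ((j : Int) - 4)) (some (j : Int))
          = (l.drop (j - 4)).take 4 := by
        have h1 : (0 : Int) ≤ (j : Int) - 4 := by omega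
        have h2 : (0 : Int) ≤ (j : Int) := by positivity
        have e1 : ((j : Int) - 4).toNat = j - 4 := by omega
        have e2 : ((j : Int)).toNat = j := by omega
        rw [PySem.List.slice_toNat l h1 h2, e1, e2]
        congr 1
        omega
      have harg1 : l.length - (j + 5) ≤ k := by omega
      have harg2 : 4 ≤ j + 5 := by omega
      rw [hslice, ih l (j + 5) harg1 harg2]
      -- the suffix at j - 4 has at least 5 elements; split them off
      have hlen : 5 ≤ (l.drop (j - 4)).length := by simp; omega
      match hdrop : l.drop (j - 4) with
      | [] => rw [hdrop] at hlen; simp at hlen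
      | [_] => rw [hdrop] at hlen; simp at hlen
      | [_, _] => rw [hdrop] at hlen; simp at hlen
      | [_, _, _] => rw [hdrop] at hlen; simp at hlen
      | [_, _, _, _] => rw [hdrop] at hlen; simp at hlen
      | a :: b :: c :: d :: e :: rest =>
        have hdrop5 : l.drop (j + 5 - 4) = rest := by
          have : l.drop (j + 5 - 4) = (l.drop (j - 4)).drop 5 := by
            rw [List.drop_drop]; congr 1; omega
          rw [this, hdrop]; rfl
        rw [hdrop5]
        show chunkF rest _ = chunkF rest _
        congr 1
        simp [List.sum, add_assoc]
    · rw [if_neg hlt, chunkF_short _ _ (by simp; omega)]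

-- ===== VERDICT (by name: the statement is the Claim_ definition above) =====
theorem beat_fitness_spec : Claim_equal_beat_fitness := by
  intro l _
  unfold Spec_beat_fitness beat_fitness beat_fitness_alt
  rw [beat_fitness_eq_chunkF l.length l le_rfl 0,
      alt_loop_eq_chunkF (l.length - 4) l 4 le_rfl le_rfl 0]
  rfl
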